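-- pv_equiv track=rewrite | github.com/sebastianruder/NLP-progress | structured/export.py | extract_lines_before_tables
-- ===== SOURCE A (Python) =====
-- from typing import Dict, Tuple, List
--
-- def extract_lines_before_tables(lines:List[str]):
--     """
--     Extract the non-empty line before the table
--
--     :param lines: a list of lines
--     :return:
--     """
--
--     out = []
--
--     before = None
--     in_table = False
--     for l in lines:
--         if l.startswith("|") and not in_table:
--             if before is not None:
--                 out.append(before)
--             in_table = True
--         elif in_table and not l.startswith("|"):
--             in_table = False
--             before = None
--             if l.strip() != "":
--                 before = l.strip()
--         elif l.strip() != "":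
--             before = l.strip()
--
--     return out
-- ===== SOURCE B (Python) =====
-- def extract_lines_before_tables(lines):
--     """
--     Extract the non-empty line before the table
--
--     :param lines: a list of lines
--     :return:
--     """
--     # pass 1: indices where a table block starts (rising edges)
--     starts = [i for i, l in enumerate(lines)
--               if l.startswith("|") and (i == 0 or not lines[i - 1].startswith("|"))]
--     out = []
--     # pass 2: for each start, walk backwards to the nearest non-empty line,
--     # stopping at the previous table block (a '|' line) or the file start
--     for i in starts:
--         j = i - 1
--         while j >= 0 and not lines[j].startswith("|"):
--             s = lines[j].strip()
--             if s != "":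
--                 out.append(s)
--                 break
--             j -= 1
--     return out
-- ===== Notes on version B (the rewrite author's own statement) =====
-- stated objective: alternative
-- what changed: Replaces A's forward one-pass state machine (carrying before/in_table) with a two-pass decomposition: first collect the rising-edge indices where a table block starts, then for each do a bounded backward scan to the nearest non-empty line, stopping at the previous table block.
import Mathlib
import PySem

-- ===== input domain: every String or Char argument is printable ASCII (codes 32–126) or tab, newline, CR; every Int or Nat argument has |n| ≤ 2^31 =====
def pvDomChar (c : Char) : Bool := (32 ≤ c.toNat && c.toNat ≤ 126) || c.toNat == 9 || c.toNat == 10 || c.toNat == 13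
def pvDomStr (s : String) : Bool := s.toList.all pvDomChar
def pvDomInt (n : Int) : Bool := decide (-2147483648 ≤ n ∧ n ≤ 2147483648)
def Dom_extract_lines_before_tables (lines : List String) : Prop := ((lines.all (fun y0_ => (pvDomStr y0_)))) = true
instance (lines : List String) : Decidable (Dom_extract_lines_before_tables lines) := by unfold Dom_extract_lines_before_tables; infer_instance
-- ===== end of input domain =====

-- B replaces A's forward one-pass state machine by a different decomposition:
-- collect the indices of table starts, then a bounded backward scan from each
-- (objective: alternative; same O(n) cost, no speed claim).

-- ===== PORT A =====
-- literal transliteration of A's for-loop as a foldl over the state (out, before, in_table)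
def extract_lines_before_tables (lines : List String) : List String :=
  (lines.foldl
    (fun (s : List String × Option String × Bool) l =>
      let o := s.1
      let before := s.2.1
      let in_table := s.2.2
      if PySem.Str.startswith l "|" && !in_table then
        (o ++ (match before with | some x => [x] | none => []), before, true)
      else if in_table && !(PySem.Str.startswith l "|") then
        (o, if PySem.Str.strip l ≠ "" then some (PySem.Str.strip l) else none, false)
      else if PySem.Str.strip l ≠ "" then
        (o, some (PySem.Str.strip l), in_table)
      else
        (o, before, in_table))
    ([], none, false)).1

-- ===== PORT B =====
-- Source B's backward while-loop (j from i-1 down to 0, stop at a '|' line; append-and-break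
-- becomes returning `some`); argument k is j+1, so k = 0 is "j < 0, loop ends, nothing found"
def pvBackScan (lines : List String) : Nat → Option String
  | 0 => none
  | k + 1 =>
    let l := lines.getD k ""
    if PySem.Str.startswith l "|" then none
    else if PySem.Str.strip l ≠ "" then some (PySem.Str.strip l)
    else pvBackScan lines k


def extract_lines_before_tables_alt (lines : List String) : List String :=
  -- pass 1: the rising-edge indices (the list comprehension over enumerate(lines))
  let starts : List Int := (PySem.List.enumerate lines 0).filterMap
    (fun p => if PySem.Str.startswith p.2 "|" &&
                 (p.1 == 0 || !(PySem.Str.startswith (PySem.List.pyGetD lines (p.1 - 1) "") "|"))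
              then some p.1 else none)
  -- pass 2: for each start, the backward scan; its found line (if any) goes to out
  starts.filterMap (fun i => pvBackScan lines i.toNat)

-- ===== PRECONDITION & SPEC =====
def Spec_extract_lines_before_tables (lines : List String) (out : List String) : Prop := out = extract_lines_before_tables_alt lines
instance (lines : List String) (out : List String) : Decidable (Spec_extract_lines_before_tables lines out) := by unfold Spec_extract_lines_before_tables; infer_instance

-- ===== CLAIM (what is proved, stated in full; the proofs are below) =====
def Claim_equal_extract_lines_before_tables : Prop := ∀ (lines : List String), Dom_extract_lines_before_tables lines → Spec_extract_lines_before_tables lines (extract_lines_before_tables lines)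

-- ===== LEMMAS AND PROOFS =====

def pvSW (l : String) : Bool := PySem.Str.startswith l "|"
def pvST (l : String) : String := PySem.Str.strip l

def pvBscan : List String → Option String
  | [] => none
  | l :: r => if pvSW l then none else if pvST l ≠ "" then some (pvST l) else pvBscan r

def pvHeadSW : List String → Bool
  | [] => false
  | l :: _ => pvSW l

def pvGoA : Option String → Bool → List String → List String
  | _, _, [] => []
  | before, intab, l :: rest =>
    if pvSW l && !intab then before.toList ++ pvGoA before true rest
    else if intab && !pvSW l then
      pvGoA (if pvST l ≠ "" then some (pvST l) else none) false rest
    else if pvST l ≠ "" then pvGoA (some (pvST l)) intab rest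
    else pvGoA before intab rest

def pvGoB : List String → List String → List String
  | _, [] => []
  | rev, l :: rest =>
    (if pvSW l && !pvHeadSW rev then (pvBscan rev).toList else []) ++ pvGoB (l :: rev) rest


theorem pvFoldA (rest : List String) : ∀ (s : List String × Option String × Bool),
    (rest.foldl
      (fun (s : List String × Option String × Bool) l =>
        let o := s.1
        let before := s.2.1
        let in_table := s.2.2
        if PySem.Str.startswith l "|" && !in_table then
          (o ++ (match before with | some x => [x] | none => []), before, true)
        else if in_table && !(PySem.Str.startswith l "|") then
          (o, if PySem.Str.strip l ≠ "" then some (PySem.Str.strip l) else none, false)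
        else if PySem.Str.strip l ≠ "" then
          (o, some (PySem.Str.strip l), in_table)
        else (o, before, in_table))
      s).1 = s.1 ++ pvGoA s.2.1 s.2.2 rest := by
  induction rest with
  | nil => intro s; simp [pvGoA]
  | cons l rest ih =>
    intro s
    rw [List.foldl_cons, ih]
    obtain ⟨out, b, t⟩ := s
    by_cases hsw : PySem.Chars.startswith l.toList ['|'] = true
    · cases t
      · cases b <;> simp [hsw, pvGoA, pvSW]
      · by_cases hst : PySem.Str.strip l = "" <;>
          simp [hsw, hst, pvGoA, pvSW, pvST]
    · cases t <;> by_cases hst : PySem.Str.strip l = "" <;>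
        simp [hsw, hst, pvGoA, pvSW, pvST]

theorem pvGetD_append (pre : List String) (y : String) (ys : List String) (d : String) :
    (pre ++ y :: ys).getD pre.length d = y := by
  simp [List.getD]

theorem pvBackScan_eq_bscan (rev : List String) : ∀ (rest : List String),
    pvBackScan (rev.reverse ++ rest) rev.length = pvBscan rev := by
  induction rev with
  | nil => intro rest; simp [pvBackScan, pvBscan]
  | cons r0 rtl ih =>
    intro rest
    have hlist : (r0 :: rtl).reverse ++ rest = rtl.reverse ++ (r0 :: rest) := by simp
    have hlen : (r0 :: rtl).length = rtl.length + 1 := rfl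
    rw [hlist, hlen]
    show (let l := (rtl.reverse ++ (r0 :: rest)).getD rtl.length "";
          if PySem.Str.startswith l "|" then none
          else if PySem.Str.strip l ≠ "" then some (PySem.Str.strip l)
          else pvBackScan (rtl.reverse ++ (r0 :: rest)) rtl.length) = pvBscan (r0 :: rtl)
    have hget : (rtl.reverse ++ (r0 :: rest)).getD rtl.length "" = r0 := by
      have := pvGetD_append rtl.reverse r0 rest ""
      simpa using this
    simp only [hget, ih (r0 :: rest), pvBscan, pvSW, pvST]

theorem pvBscan_none_of_headSW (rev : List String) (h : pvHeadSW rev = true) :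
    pvBscan rev = none := by
  cases rev with
  | nil => simp [pvHeadSW] at h
  | cons r0 rtl => simp only [pvHeadSW] at h; simp [pvBscan, h]

theorem pvCond_eq (rev : List String) (l : String) (rest : List String) :
    (PySem.Str.startswith l "|" &&
      (((rev.length : Int) == 0) ||
        !(PySem.Str.startswith (PySem.List.pyGetD (rev.reverse ++ l :: rest) ((rev.length : Int) - 1) "") "|")))
      = (pvSW l && !pvHeadSW rev) := by
  cases rev with
  | nil => simp [pvSW, pvHeadSW]
  | cons r0 rtl =>
    have h0 : (((r0 :: rtl).length : Int) == 0) = false := by simp; omega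
    have hidx : ((r0 :: rtl).length : Int) - 1 = ((rtl.length : Int)) := by simp
    rw [h0, hidx]
    have hl : (r0 :: rtl).reverse ++ l :: rest = rtl.reverse ++ (r0 :: (l :: rest)) := by simp
    rw [hl, PySem.List.pyGetD_natCast]
    have hget : (rtl.reverse ++ (r0 :: l :: rest)).getD rtl.length "" = r0 := by
      have := pvGetD_append rtl.reverse r0 (l :: rest) ""
      simpa using this
    rw [hget]
    simp [pvSW, pvHeadSW]

theorem pvAltGo (rest : List String) : ∀ (rev : List String),
    (PySem.List.enumerate rest (rev.length : Int)).filterMap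
      (fun p =>
        (if PySem.Str.startswith p.2 "|" &&
            (p.1 == 0 || !(PySem.Str.startswith (PySem.List.pyGetD (rev.reverse ++ rest) (p.1 - 1) "") "|"))
         then some p.1 else none).bind
        (fun i => pvBackScan (rev.reverse ++ rest) i.toNat))
      = pvGoB rev rest := by
  induction rest with
  | nil => intro rev; simp [PySem.List.enumerate_nil, pvGoB]
  | cons l rest ih =>
    intro rev
    rw [PySem.List.enumerate_cons]
    have hlist : rev.reverse ++ l :: rest = (l :: rev).reverse ++ rest := by simp
    have hlen : ((rev.length : Int) + 1) = (((l :: rev).length : Int)) := by simp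
    have htail : (PySem.List.enumerate rest ((rev.length : Int) + 1)).filterMap
        (fun p =>
          (if PySem.Str.startswith p.2 "|" &&
              (p.1 == 0 || !(PySem.Str.startswith (PySem.List.pyGetD (rev.reverse ++ l :: rest) (p.1 - 1) "") "|"))
           then some p.1 else none).bind
          (fun i => pvBackScan (rev.reverse ++ l :: rest) i.toNat)) = pvGoB (l :: rev) rest := by
      rw [hlist, hlen, ih (l :: rev)]
    by_cases hc : (pvSW l && !pvHeadSW rev) = true
    · have hhead : (fun (p : Int × String) =>
          (if PySem.Str.startswith p.2 "|" &&
              (p.1 == 0 || !(PySem.Str.startswith (PySem.List.pyGetD (rev.reverse ++ l :: rest) (p.1 - 1) "") "|"))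
           then some p.1 else none).bind
          (fun i => pvBackScan (rev.reverse ++ l :: rest) i.toNat)) ((rev.length : Int), l)
          = pvBscan rev := by
        show (if PySem.Str.startswith l "|" &&
              (((rev.length : Int)) == 0 || !(PySem.Str.startswith (PySem.List.pyGetD (rev.reverse ++ l :: rest) ((rev.length : Int) - 1) "") "|"))
           then some ((rev.length : Int)) else none).bind
          (fun i => pvBackScan (rev.reverse ++ l :: rest) i.toNat) = pvBscan rev
        rw [pvCond_eq rev l rest, if_pos hc]
        show pvBackScan (rev.reverse ++ l :: rest) ((rev.length : Int)).toNat = pvBscan rev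
        rw [show ((rev.length : Int)).toNat = rev.length by simp]
        exact pvBackScan_eq_bscan rev (l :: rest)
      cases hbsv : pvBscan rev with
      | none =>
        rw [List.filterMap_cons_none (by exact hhead.trans hbsv), htail]
        simp [pvGoB, hc, hbsv]
      | some v =>
        rw [List.filterMap_cons_some (by exact hhead.trans hbsv), htail]
        simp [pvGoB, hc, hbsv]
    · have hhead : (fun (p : Int × String) =>
          (if PySem.Str.startswith p.2 "|" &&
              (p.1 == 0 || !(PySem.Str.startswith (PySem.List.pyGetD (rev.reverse ++ l :: rest) (p.1 - 1) "") "|"))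
           then some p.1 else none).bind
          (fun i => pvBackScan (rev.reverse ++ l :: rest) i.toNat)) ((rev.length : Int), l)
          = none := by
        show (if PySem.Str.startswith l "|" &&
              (((rev.length : Int)) == 0 || !(PySem.Str.startswith (PySem.List.pyGetD (rev.reverse ++ l :: rest) ((rev.length : Int) - 1) "") "|"))
           then some ((rev.length : Int)) else none).bind
          (fun i => pvBackScan (rev.reverse ++ l :: rest) i.toNat) = none
        rw [pvCond_eq rev l rest, if_neg (by simpa using hc)]
        rfl
      rw [List.filterMap_cons_none (by exact hhead), htail]
      simp [pvGoB, hc]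

theorem pvGoA_eq_goB (rest : List String) : ∀ (rev : List String) (b : Option String),
    (pvHeadSW rev = false → b = pvBscan rev) →
    pvGoA b (pvHeadSW rev) rest = pvGoB rev rest := by
  induction rest with
  | nil => intro rev b _; simp [pvGoA, pvGoB]
  | cons l rest ih =>
    intro rev b hb
    by_cases hsw : pvSW l = true
    · have hhd : pvHeadSW (l :: rev) = true := by simpa [pvHeadSW] using hsw
      by_cases ht : pvHeadSW rev = true
      · have h1 : (pvSW l && !pvHeadSW rev) = false := by simp [hsw, ht]
        rw [ht]
        by_cases hst : pvST l = ""
        · have := ih (l :: rev) b (by rw [hhd]; intro h; simp at h)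
          rw [hhd] at this
          simp [pvGoA, pvGoB, hsw, hst, ht, this]
        · have := ih (l :: rev) (some (pvST l)) (by rw [hhd]; intro h; simp at h)
          rw [hhd] at this
          simp [pvGoA, pvGoB, hsw, hst, ht, this]
      · have ht' : pvHeadSW rev = false := by simpa using ht
        have h1 : (pvSW l && !pvHeadSW rev) = true := by simp [hsw, ht']
        rw [ht']
        have hrec := ih (l :: rev) b (by rw [hhd]; intro h; simp at h)
        rw [hhd] at hrec
        rw [hb ht'] at hrec ⊢
        simp [pvGoA, pvGoB, hsw, ht', hrec]
    · have hsw' : pvSW l = false := by simpa using hsw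
      have hhd : pvHeadSW (l :: rev) = false := by simpa [pvHeadSW] using hsw'
      have h1 : (pvSW l && !pvHeadSW rev) = false := by simp [hsw']
      by_cases ht : pvHeadSW rev = true
      · rw [ht]
        have hbs : (if pvST l ≠ "" then some (pvST l) else none) = pvBscan (l :: rev) := by
          by_cases hst : pvST l = ""
          · simp [pvBscan, hsw', hst, pvBscan_none_of_headSW rev ht]
          · simp [pvBscan, hsw', hst]
        have := ih (l :: rev) (if pvST l ≠ "" then some (pvST l) else none) (fun _ => hbs)
        rw [hhd] at this
        simp only [ne_eq, ite_not] at this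
        simp only [pvGoA, pvGoB]
        simp [hsw', ht, this]
      · have ht' : pvHeadSW rev = false := by simpa using ht
        rw [ht']
        by_cases hst : pvST l = ""
        · have hbs : b = pvBscan (l :: rev) := by
            rw [hb ht']
            simp [pvBscan, hsw', hst]
          have := ih (l :: rev) b (fun _ => hbs)
          rw [hhd] at this
          simp [pvGoA, pvGoB, hsw', hst, ht', this]
        · have hbs : (some (pvST l) : Option String) = pvBscan (l :: rev) := by
            simp [pvBscan, hsw', hst]
          have := ih (l :: rev) (some (pvST l)) (fun _ => hbs)
          rw [hhd] at this
          simp [pvGoA, pvGoB, hsw', hst, ht', this]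

theorem pvAlt_eq_goB (lines : List String) :
    extract_lines_before_tables_alt lines = pvGoB [] lines := by
  unfold extract_lines_before_tables_alt
  rw [List.filterMap_filterMap]
  simpa using pvAltGo lines []

-- ===== VERDICT (by name: the statement is the Claim_ definition above) =====
theorem extract_lines_before_tables_spec : Claim_equal_extract_lines_before_tables := by
  intro lines _
  show extract_lines_before_tables lines = extract_lines_before_tables_alt lines
  unfold extract_lines_before_tables
  rw [pvFoldA lines ([], none, false), pvAlt_eq_goB]
  have := pvGoA_eq_goB lines [] none (fun _ => by simp [pvBscan])
  simpa [pvHeadSW] using this
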